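-- pv_equiv track=rewrite | github.com/KobaltKoding/bookcut | bookcut/downloader.py | _reorder_mirrors
-- ===== SOURCE A (Python) =====
-- def _reorder_mirrors(mirrors: list[str]) -> list[str]:
--     """Reorder mirrors to prioritize IPFS and reliable sources."""
--     ipfs = []
--     https = []
--
--     for url in mirrors:
--         if "ipfs" in url or "dweb.link" in url:
--             ipfs.append(url)
--         elif not any(
--             blocked in url for blocked in ["annas-archive.se", "1lib.sk"]
--         ):
--             https.append(url)
--
--     return ipfs + https
-- ===== SOURCE B (Python) =====
-- def _reorder_mirrors(mirrors: list[str]) -> list[str]: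
--     """Filter out blocked hosts, then stable-sort with IPFS mirrors first."""
--
--     def is_ipfs(url):
--         return "ipfs" in url or "dweb.link" in url
--
--     kept = [
--         url
--         for url in mirrors
--         if is_ipfs(url)
--         or not any(blocked in url for blocked in ["annas-archive.se", "1lib.sk"])
--     ]
--     return sorted(kept, key=lambda url: 0 if is_ipfs(url) else 1)
-- ===== Notes on version B (the rewrite author's own statement) =====
-- stated objective: idiomatic
-- what changed: Replaced the two-accumulator classification loop with a single filter comprehension followed by a stable sort on a 0/1 IPFS key (Python's sort stability reproduces A's within-group order).
import Mathlib
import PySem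

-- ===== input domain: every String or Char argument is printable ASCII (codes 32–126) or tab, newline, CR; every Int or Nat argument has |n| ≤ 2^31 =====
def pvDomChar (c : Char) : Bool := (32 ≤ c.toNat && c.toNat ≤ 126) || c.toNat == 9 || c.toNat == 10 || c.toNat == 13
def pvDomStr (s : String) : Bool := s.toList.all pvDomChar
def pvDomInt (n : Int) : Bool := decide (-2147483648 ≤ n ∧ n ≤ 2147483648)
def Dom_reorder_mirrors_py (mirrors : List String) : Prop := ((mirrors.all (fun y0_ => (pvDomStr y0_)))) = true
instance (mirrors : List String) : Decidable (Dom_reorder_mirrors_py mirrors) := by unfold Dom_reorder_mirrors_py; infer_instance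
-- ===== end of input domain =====

-- B replaces A's two-accumulator classification loop by filter-then-stable-sort on a 0/1 IPFS key (idiomatic; same results).

-- ===== PORT A =====
def reorder_mirrors_py (mirrors : List String) : List String :=
  let r := mirrors.foldl
    (fun (acc : List String × List String) url =>
      if PySem.Str.isIn "ipfs" url || PySem.Str.isIn "dweb.link" url then
        (acc.1 ++ [url], acc.2)
      else if !(["annas-archive.se", "1lib.sk"].any (fun blocked => PySem.Str.isIn blocked url)) then
        (acc.1, acc.2 ++ [url])
      else acc)
    ([], [])
  r.1 ++ r.2

-- ===== PORT B =====
def rm_isIpfs (url : String) : Bool :=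
  PySem.Str.isIn "ipfs" url || PySem.Str.isIn "dweb.link" url

def reorder_mirrors_py_alt (mirrors : List String) : List String :=
  let kept := mirrors.filter (fun url =>
    rm_isIpfs url || !(["annas-archive.se", "1lib.sk"].any (fun blocked => PySem.Str.isIn blocked url)))
  PySem.List.sorted kept (fun url => if rm_isIpfs url then (0 : Int) else 1)

-- ===== PRECONDITION & SPEC =====
def Spec_reorder_mirrors_py (mirrors : List String) (out : List String) : Prop := out = reorder_mirrors_py_alt mirrors
instance (mirrors : List String) (out : List String) : Decidable (Spec_reorder_mirrors_py mirrors out) := by unfold Spec_reorder_mirrors_py; infer_instance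

-- ===== CLAIM (what is proved, stated in full; the proofs are below) =====
def Claim_equal_reorder_mirrors_py : Prop := ∀ (mirrors : List String), Dom_reorder_mirrors_py mirrors → Spec_reorder_mirrors_py mirrors (reorder_mirrors_py mirrors)

-- ===== LEMMAS AND PROOFS =====

def rm_blocked (url : String) : Bool :=
  ["annas-archive.se", "1lib.sk"].any (fun blocked => PySem.Str.isIn blocked url)

-- A's loop, characterised: it partitions the input into the ipfs list and the unblocked-https list.
theorem rm_foldA (xs : List String) (a b : List String) :
    xs.foldl
      (fun (acc : List String × List String) url =>
        if PySem.Str.isIn "ipfs" url || PySem.Str.isIn "dweb.link" url then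
          (acc.1 ++ [url], acc.2)
        else if !(["annas-archive.se", "1lib.sk"].any (fun blocked => PySem.Str.isIn blocked url)) then
          (acc.1, acc.2 ++ [url])
        else acc)
      (a, b)
    = (a ++ xs.filter rm_isIpfs,
       b ++ xs.filter (fun u => !rm_isIpfs u && !rm_blocked u)) := by
  induction xs generalizing a b with
  | nil => simp
  | cons x xs ih =>
    cases hp : rm_isIpfs x with
    | true =>
      simp only [List.foldl_cons, List.filter_cons]
      rw [show (PySem.Str.isIn "ipfs" x || PySem.Str.isIn "dweb.link" x) = rm_isIpfs x from rfl, hp]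
      simp only [if_true, ih]
      simp
    | false =>
      simp only [List.foldl_cons, List.filter_cons]
      rw [show (PySem.Str.isIn "ipfs" x || PySem.Str.isIn "dweb.link" x) = rm_isIpfs x from rfl, hp]
      cases hb : rm_blocked x with
      | true =>
        rw [show (["annas-archive.se", "1lib.sk"].any (fun blocked => PySem.Str.isIn blocked x)) = rm_blocked x from rfl, hb]
        simp only [Bool.not_true, Bool.false_eq_true, if_false, ih]
        simp
      | false =>
        rw [show (["annas-archive.se", "1lib.sk"].any (fun blocked => PySem.Str.isIn blocked x)) = rm_blocked x from rfl, hb]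
        simp only [Bool.not_false, if_true, ih]
        simp

theorem rm_insertBy_append_left {α : Type} (before : α → α → Bool) (x : α) (P N : List α)
    (h : ∀ a ∈ P, before x a = false) :
    PySem.List.insertBy before x (P ++ N) = P ++ PySem.List.insertBy before x N := by
  induction P with
  | nil => simp
  | cons p P ih =>
    simp only [List.cons_append, PySem.List.insertBy, h p (by simp)]
    simp only [Bool.false_eq_true, if_false, List.cons.injEq, true_and]
    exact ih (fun a ha => h a (by simp [ha]))

-- a stable sort on a 0/1 key is exactly "the 0-keyed elements, then the 1-keyed elements"
theorem rm_sort01 {α : Type} (p : α → Bool) (xs : List α) :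
    PySem.List.sorted xs (fun x => if p x then (0 : Int) else 1)
      = xs.filter p ++ xs.filter (fun x => !p x) := by
  rw [PySem.List.sorted_eq_foldl_insertBy]
  suffices h : ∀ (ys : List α) (P N : List α), (∀ a ∈ P, p a = true) → (∀ a ∈ N, p a = false) →
      ys.foldl (fun acc x =>
          PySem.List.insertBy
            (fun a b => decide ((if p a then (0 : Int) else 1) < (if p b then (0 : Int) else 1)))
            x acc) (P ++ N)
        = (P ++ ys.filter p) ++ (N ++ ys.filter (fun x => !p x)) by
    have := h xs [] [] (by simp) (by simp)
    simpa using this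
  intro ys
  induction ys with
  | nil => intro P N _ _; simp
  | cons y ys ih =>
    intro P N hP hN
    simp only [List.foldl_cons, List.filter_cons]
    by_cases hp : p y
    · have hins : PySem.List.insertBy
          (fun a b => decide ((if p a then (0 : Int) else 1) < (if p b then (0 : Int) else 1)))
          y (P ++ N) = (P ++ [y]) ++ N := by
        rw [rm_insertBy_append_left _ _ _ _ (fun a ha => by simp [hp, hP a ha])]
        cases N with
        | nil => simp [PySem.List.insertBy]
        | cons n N' =>
          simp [PySem.List.insertBy, hp, hN n (by simp)]
      rw [hins, ih (P ++ [y]) N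
        (fun a ha => by rcases List.mem_append.1 ha with h' | h'
                        · exact hP a h'
                        · simp at h'; subst h'; exact hp) hN]
      simp [hp]
    · have hins : PySem.List.insertBy
          (fun a b => decide ((if p a then (0 : Int) else 1) < (if p b then (0 : Int) else 1)))
          y (P ++ N) = P ++ (N ++ [y]) := by
        rw [PySem.List.insertBy_of_forall_not_before _ _ _
          (fun a _ => by simp [hp]; split <;> omega)]
        simp
      rw [hins, ih P (N ++ [y]) hP
        (fun a ha => by rcases List.mem_append.1 ha with h' | h'
                        · exact hN a h'
                        · simp at h'; subst h'; exact eq_false_of_ne_true hp)]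
      simp [hp]

-- ===== VERDICT (by name: the statement is the Claim_ definition above) =====
theorem reorder_mirrors_py_spec : Claim_equal_reorder_mirrors_py := by
  intro mirrors _
  unfold Spec_reorder_mirrors_py reorder_mirrors_py reorder_mirrors_py_alt
  rw [rm_foldA]
  simp only [List.nil_append]
  rw [show (fun url => rm_isIpfs url ||
        !(["annas-archive.se", "1lib.sk"].any (fun blocked => PySem.Str.isIn blocked url)))
      = (fun url => rm_isIpfs url || !rm_blocked url) from rfl]
  rw [rm_sort01]
  rw [List.filter_filter, List.filter_filter]
  congr 1
  · exact List.filter_congr (fun u _ => by cases hp : rm_isIpfs u <;> simp)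
  · exact List.filter_congr (fun u _ => by
      cases hp : rm_isIpfs u <;> cases hb : rm_blocked u <;> simp)
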